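-- pv_equiv track=rewrite | github.com/LunaciaDev/adventofcode | 2016/Day 18/solution.py | taskTwo
-- ===== SOURCE A (Python) =====
-- def taskTwo(inputStream):
--     colCount = len(inputStream)
--     rowCount = 400000
--
--     roomTiles = [[0]]
--
--     for tile in inputStream:
--         if tile == '^':
--             roomTiles[0].append(1)
--         else:
--             roomTiles[0].append(0)
--
--     roomTiles[0].append(0)
--
--     for index in range(1, rowCount):
--         roomTiles.append([0])
--
--         currentRow = roomTiles[index]
--         previousRow = roomTiles[index - 1]
--
--         for colIndex in range(1, colCount+1):
--             if previousRow[colIndex - 1] == 1 and previousRow[colIndex] == 1 and previousRow[colIndex + 1] == 0: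
--                 currentRow.append(1)
--                 continue
--
--             if previousRow[colIndex - 1] == 0 and previousRow[colIndex] == 1 and previousRow[colIndex + 1] == 1:
--                 currentRow.append(1)
--                 continue
--
--             if previousRow[colIndex - 1] == 1 and previousRow[colIndex] == 0 and previousRow[colIndex + 1] == 0:
--                 currentRow.append(1)
--                 continue
--
--             if previousRow[colIndex - 1] == 0 and previousRow[colIndex] == 0 and previousRow[colIndex + 1] == 1:
--                 currentRow.append(1)
--                 continue
--
--             currentRow.append(0)
--
--         currentRow.append(0)
--
--     trapCount = 0
--
--     for row in roomTiles:
--         trapCount += sum(row)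
--
--     return (colCount * rowCount) - trapCount
-- ===== SOURCE B (Python) =====
-- def taskTwo(inputStream):
--     colCount = len(inputStream)
--     mask = (1 << colCount) - 1
--     row = 0
--     for tile in inputStream:
--         row = (row << 1) | (1 if tile == '^' else 0)
--     safeCount = 0
--     for _ in range(400000):
--         safeCount += colCount - row.bit_count()
--         row = ((row << 1) ^ (row >> 1)) & mask
--     return safeCount
-- ===== Notes on version B (the rewrite author's own statement) =====
-- stated objective: faster
-- what changed: B replaces A's 400000 materialised rows of per-cell 0/1 list entries (built cell by cell with three list lookups each, then summed in a second pass) by one integer per row updated bit-parallel with next = ((row<<1) ^ (row>>1)) & mask, counting safe tiles via popcount and accumulating the total in the same single loop.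
import Mathlib
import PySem

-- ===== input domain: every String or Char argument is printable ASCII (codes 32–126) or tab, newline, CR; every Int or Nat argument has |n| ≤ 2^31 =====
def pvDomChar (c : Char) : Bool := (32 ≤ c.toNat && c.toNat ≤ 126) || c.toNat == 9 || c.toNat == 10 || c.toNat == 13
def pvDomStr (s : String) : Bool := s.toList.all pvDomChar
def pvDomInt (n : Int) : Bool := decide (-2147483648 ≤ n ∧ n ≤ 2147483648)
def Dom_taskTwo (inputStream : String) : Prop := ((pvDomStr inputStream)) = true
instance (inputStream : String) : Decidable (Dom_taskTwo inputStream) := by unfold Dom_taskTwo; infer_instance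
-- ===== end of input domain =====

-- B replaces A's 400000 explicit rows of 0/1 list cells by one integer per row updated
-- bit-parallel (next = (row<<1 ^ row>>1) & mask) and counts safe tiles with popcount,
-- summing as it goes instead of materialising the grid. Objective: faster (constant factor).

-- ===== PORT A =====
-- Row-0 build: [0], then append 1/0 per tile, then append 0.
def rowInitA (inputStream : String) : List Int :=
  (inputStream.toList.foldl (fun r t => r ++ [if t = '^' then (1:Int) else 0]) [0]) ++ [0]

-- Inner loop over colIndex in range(1, colCount+1); the indices are always in range
-- (previousRow has length colCount+2), so pyGetD's default 0 is never used.
def nextRowA (colCount : Int) (previousRow : List Int) : List Int :=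
  ((PySem.List.pyRange 1 (colCount+1) 1).foldl (fun currentRow colIndex =>
      if PySem.List.pyGetD previousRow (colIndex-1) 0 = 1 ∧ PySem.List.pyGetD previousRow colIndex 0 = 1 ∧ PySem.List.pyGetD previousRow (colIndex+1) 0 = 0 then currentRow ++ [1]
      else if PySem.List.pyGetD previousRow (colIndex-1) 0 = 0 ∧ PySem.List.pyGetD previousRow colIndex 0 = 1 ∧ PySem.List.pyGetD previousRow (colIndex+1) 0 = 1 then currentRow ++ [1]
      else if PySem.List.pyGetD previousRow (colIndex-1) 0 = 1 ∧ PySem.List.pyGetD previousRow colIndex 0 = 0 ∧ PySem.List.pyGetD previousRow (colIndex+1) 0 = 0 then currentRow ++ [1]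
      else if PySem.List.pyGetD previousRow (colIndex-1) 0 = 0 ∧ PySem.List.pyGetD previousRow colIndex 0 = 0 ∧ PySem.List.pyGetD previousRow (colIndex+1) 0 = 1 then currentRow ++ [1]
      else currentRow ++ [0]) [0]) ++ [0]

-- Python appends each new row to the end of roomTiles and reads roomTiles[index-1],
-- i.e. the previously appended row: transcribed as cons onto a reversed accumulator
-- (head = previous row), reversed back before the summing pass.
def taskTwo (inputStream : String) : Int :=
  let colCount : Int := (inputStream.toList.length : Int)
  let revRows := (PySem.List.pyRange 1 400000 1).foldl
      (fun revRooms _ => nextRowA colCount (revRooms.headD []) :: revRooms) [rowInitA inputStream]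
  let roomTiles := revRows.reverse
  let trapCount := roomTiles.foldl (fun acc row => acc + row.foldl (· + ·) 0) 0
  colCount * 400000 - trapCount

-- ===== PORT B =====
def taskTwo_alt (inputStream : String) : Int :=
  let colCount : Int := (inputStream.toList.length : Int)
  let mask : Int := (1 <<< inputStream.toList.length) - 1
  let row : Int := inputStream.toList.foldl
      (fun row tile => PySem.Int.bor (row <<< 1) (if tile = '^' then 1 else 0)) 0
  let res := (List.range 400000).foldl
      (fun (st : Int × Int) _ =>
        (st.1 + (colCount - (PySem.Int.bitCount st.2 : Int)),
         PySem.Int.band (PySem.Int.bxor (st.2 <<< 1) (st.2 >>> 1)) mask))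
      (0, row)
  res.1

-- ===== PRECONDITION & SPEC =====
def Spec_taskTwo (inputStream : String) (out : Int) : Prop := out = taskTwo_alt inputStream
instance (inputStream : String) (out : Int) : Decidable (Spec_taskTwo inputStream out) := by unfold Spec_taskTwo; infer_instance

-- ===== CLAIM (what is proved, stated in full; the proofs are below) =====
def Claim_equal_taskTwo : Prop := ∀ (inputStream : String), Dom_taskTwo inputStream → Spec_taskTwo inputStream (taskTwo inputStream)

-- ===== LEMMAS AND PROOFS =====

-- The bit of n at position k, as the Int 0/1 used by A's tile lists.
def bitI (n k : Nat) : Int := if n.testBit k then 1 else 0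

-- A's interior row cells, most significant bit first.
def toBits (w n : Nat) : List Int := (List.range w).map (fun i => bitI n (w-1-i))

-- B's row transition, on Nat.
def stepN (col n : Nat) : Nat := ((n <<< 1) ^^^ (n >>> 1)) &&& (2^col - 1)

-- B's row-0 encoding, on Nat.
def encN (cs : List Char) : Nat := cs.foldl (fun n t => 2*n + (if t = '^' then 1 else 0)) 0

theorem or_two_mul_add (a b : Nat) (hb : b ≤ 1) : 2*a ||| b = 2*a + b := by
  interval_cases b
  · simp
  · apply Nat.eq_of_testBit_eq; intro i
    cases i with
    | zero => simp [Nat.mul_comm, Nat.testBit_zero]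
    | succ j =>
        rw [Nat.testBit_or, Nat.testBit_succ, Nat.testBit_succ, Nat.testBit_succ]
        have h1 : 2*a/2 = a := by omega
        have h2 : (2*a+1)/2 = a := by omega
        have h3 : (1:Nat)/2 = 0 := by norm_num
        simp [h1, h2, h3]

theorem encInt (cs : List Char) (a : Nat) :
    cs.foldl (fun row tile => PySem.Int.bor (row <<< 1) (if tile = '^' then 1 else 0)) ((a : Nat) : Int)
      = ((cs.foldl (fun n t => 2*n + (if t = '^' then 1 else 0)) a : Nat) : Int) := by
  induction cs generalizing a with
  | nil => rfl
  | cons c cs ih =>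
      simp only [List.foldl_cons]
      have hsh : ((a:Int) <<< 1) = ((a <<< 1 : Nat) : Int) := rfl
      have hb : (if c = '^' then (1:Int) else 0) = (((if c = '^' then 1 else 0) : Nat) : Int) := by
        split <;> rfl
      rw [hsh, hb, PySem.Int.bor_natCast]
      have : (a <<< 1) ||| (if c = '^' then 1 else 0) = 2*a + (if c = '^' then 1 else 0) := by
        rw [Nat.shiftLeft_eq, pow_one, Nat.mul_comm a 2]
        exact or_two_mul_add a _ (by split <;> omega)
      rw [this, ih]

theorem encN_lt (cs : List Char) : encN cs < 2^cs.length := by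
  induction cs using List.reverseRecOn with
  | nil => simp [encN]
  | append_singleton cs c ih =>
      have h : encN (cs ++ [c]) = 2 * encN cs + (if c = '^' then 1 else 0) := by
        simp [encN, List.foldl_append]
      rw [h]
      have : 2 ^ (cs ++ [c]).length = 2 * 2 ^ cs.length := by
        simp [List.length_append, pow_succ]; ring
      rw [this]
      split <;> omega

theorem toBits_get (w n i : Nat) (h : i < w) : (toBits w n)[i]'(by simp [toBits]; omega) = bitI n (w-1-i) := by
  simp [toBits]

theorem toBits_length (w n : Nat) : (toBits w n).length = w := by simp [toBits]

theorem toBits_snoc (w n b : Nat) (hb : b ≤ 1) :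
    toBits (w+1) (2*n+b) = toBits w n ++ [(b : Int)] := by
  unfold toBits
  rw [List.range_succ, List.map_append]
  congr 1
  · apply List.map_congr_left
    intro i hi
    rw [List.mem_range] at hi
    have he : w + 1 - 1 - i = (w - 1 - i) + 1 := by omega
    rw [he]
    unfold bitI
    rw [Nat.testBit_succ]
    have : (2*n+b)/2 = n := by omega
    rw [this]
  · simp only [List.map_cons, List.map_nil]
    unfold bitI
    have : w + 1 - 1 - w = 0 := by omega
    rw [this, Nat.testBit_zero]
    interval_cases b <;> simp

theorem toBits_zero_sum (w : Nat) : (toBits w 0).sum = 0 := by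
  unfold toBits bitI
  simp

theorem toBits_sum (w n : Nat) (hn : n < 2^w) :
    (toBits w n).sum = (PySem.Int.bitCount (n : Int) : Int) := by
  induction w generalizing n with
  | zero =>
      have : n = 0 := by simpa using hn
      subst this; simp [toBits, PySem.Int.bitCount_zero]
  | succ w ih =>
      rcases Nat.eq_zero_or_pos n with h0 | hpos
      · subst h0; simp [toBits_zero_sum, PySem.Int.bitCount_zero]
      · have hd : n = 2*(n/2) + n % 2 := by omega
        have hsplit : toBits (w+1) n = toBits w (n/2) ++ [((n % 2 : Nat) : Int)] := by
          conv_lhs => rw [hd]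
          exact toBits_snoc w (n/2) (n % 2) (by omega)
        rw [hsplit, List.sum_append]
        have hlt : n/2 < 2^w := by
          have : 2^(w+1) = 2^w * 2 := by rw [pow_succ]
          omega
        rw [ih (n/2) hlt]
        rw [PySem.Int.bitCount_natCast (m := n) hpos]
        push_cast
        rw [List.sum_singleton]
        omega

theorem step_lt (col n : Nat) : stepN col n < 2^col := by
  unfold stepN
  calc _ ≤ 2^col - 1 := Nat.and_le_right
    _ < 2^col := by have : 0 < 2^col := Nat.two_pow_pos col; omega

theorem rowInit_eq (s : String) :
    rowInitA s = [0] ++ toBits s.toList.length (encN s.toList) ++ [0] := by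
  unfold rowInitA
  rw [PySem.List.foldl_append_singleton_eq_map]
  congr 1
  congr 1
  generalize s.toList = cs
  induction cs using List.reverseRecOn with
  | nil => rfl
  | append_singleton cs c ih =>
      have h : encN (cs ++ [c]) = 2 * encN cs + (if c = '^' then 1 else 0) := by
        simp [encN, List.foldl_append]
      rw [List.map_append, ih, List.length_append, List.length_singleton, h,
          toBits_snoc cs.length (encN cs) _ (by split <;> omega)]
      congr 1
      simp only [List.map_cons, List.map_nil]
      split <;> rfl

-- the cell previousRow[j] of the padded row, for 0 ≤ j ≤ col+1
theorem prev_get (col n j : Nat) (hj : j ≤ col + 1) :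
    PySem.List.pyGetD ([0] ++ toBits col n ++ [0]) (j : Int) 0
      = if j = 0 then 0 else if j = col+1 then 0 else bitI n (col - j) := by
  rw [PySem.List.pyGetD_natCast]
  rcases Nat.eq_zero_or_pos j with h0 | hpos
  · subst h0; simp
  · have hj1 : j - 1 < (toBits col n ++ [0]).length := by
      simp [toBits_length]; omega
    have hstep : ([0] ++ toBits col n ++ [0] : List Int).getD j 0 = (toBits col n ++ [0]).getD (j-1) 0 := by
      rcases Nat.exists_eq_add_of_lt hpos with ⟨k, hk⟩
      have : j = k + 1 := by omega
      subst this
      simp [List.getD]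
    rw [hstep]
    by_cases hcol : j = col + 1
    · subst hcol
      have hz : (toBits col n ++ [0] : List Int).getD (col + 1 - 1) 0 = 0 := by
        rw [List.getD_eq_getElem _ _ (by simp [toBits_length])]
        rw [List.getElem_append_right (by simp [toBits_length])]
        simp [toBits_length]
      rw [hz]
      simp
    · have hjc : j - 1 < col := by omega
      have hv : (toBits col n ++ [0] : List Int).getD (j-1) 0 = bitI n (col - j) := by
        rw [List.getD_eq_getElem _ _ (by simp [toBits_length]; omega)]
        rw [List.getElem_append_left (by simp [toBits_length]; omega)]
        rw [toBits_get col n (j-1) hjc]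
        congr 1
        omega
      rw [hv]
      have hne : ¬ j = 0 := by omega
      simp [hcol, hne]

theorem step_row (col n : Nat) (hn : n < 2^col) :
    nextRowA (col : Int) ([0] ++ toBits col n ++ [0]) = [0] ++ toBits col (stepN col n) ++ [0] := by
  set prev := [0] ++ toBits col n ++ [0] with hprev
  unfold nextRowA
  rw [PySem.List.pyRange_one]
  have h1 : ((col : Int) + 1 - 1).toNat = col := by omega
  rw [h1, List.foldl_map]
  set cellF : Nat → Int := fun k =>
      if PySem.List.pyGetD prev (1 + (k:Int) - 1) 0 = 1 ∧ PySem.List.pyGetD prev (1 + (k:Int)) 0 = 1 ∧ PySem.List.pyGetD prev (1 + (k:Int) + 1) 0 = 0 then (1:Int)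
      else if PySem.List.pyGetD prev (1 + (k:Int) - 1) 0 = 0 ∧ PySem.List.pyGetD prev (1 + (k:Int)) 0 = 1 ∧ PySem.List.pyGetD prev (1 + (k:Int) + 1) 0 = 1 then 1
      else if PySem.List.pyGetD prev (1 + (k:Int) - 1) 0 = 1 ∧ PySem.List.pyGetD prev (1 + (k:Int)) 0 = 0 ∧ PySem.List.pyGetD prev (1 + (k:Int) + 1) 0 = 0 then 1
      else if PySem.List.pyGetD prev (1 + (k:Int) - 1) 0 = 0 ∧ PySem.List.pyGetD prev (1 + (k:Int)) 0 = 0 ∧ PySem.List.pyGetD prev (1 + (k:Int) + 1) 0 = 1 then 1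
      else 0 with hcell
  have hfun : (fun (currentRow : List Int) (k : Nat) =>
      if PySem.List.pyGetD prev (1 + (k:Int) - 1) 0 = 1 ∧ PySem.List.pyGetD prev (1 + (k:Int)) 0 = 1 ∧ PySem.List.pyGetD prev (1 + (k:Int) + 1) 0 = 0 then currentRow ++ [1]
      else if PySem.List.pyGetD prev (1 + (k:Int) - 1) 0 = 0 ∧ PySem.List.pyGetD prev (1 + (k:Int)) 0 = 1 ∧ PySem.List.pyGetD prev (1 + (k:Int) + 1) 0 = 1 then currentRow ++ [1]
      else if PySem.List.pyGetD prev (1 + (k:Int) - 1) 0 = 1 ∧ PySem.List.pyGetD prev (1 + (k:Int)) 0 = 0 ∧ PySem.List.pyGetD prev (1 + (k:Int) + 1) 0 = 0 then currentRow ++ [1]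
      else if PySem.List.pyGetD prev (1 + (k:Int) - 1) 0 = 0 ∧ PySem.List.pyGetD prev (1 + (k:Int)) 0 = 0 ∧ PySem.List.pyGetD prev (1 + (k:Int) + 1) 0 = 1 then currentRow ++ [1]
      else currentRow ++ [0])
    = fun (currentRow : List Int) (k : Nat) => currentRow ++ [cellF k] := by
    funext cur k
    simp only [hcell]
    split_ifs <;> rfl
  rw [hfun, PySem.List.foldl_append_singleton_eq_map]
  suffices hmid : List.map cellF (List.range col) = toBits col (stepN col n) by rw [hmid]
  refine List.ext_getElem (by simp [toBits_length]) ?_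
  intro k hk1 hk2
  simp only [List.getElem_map, List.getElem_range]
  have hkcol : k < col := by simpa using hk1
  simp only [hcell]
  clear hfun hcell
  -- normalise the three Int indices to Nat casts
  have e1 : (1 + (k:Int) - 1) = ((k : Nat) : Int) := by omega
  have e2 : (1 + (k:Int)) = (((k+1) : Nat) : Int) := by push_cast; omega
  have e3 : ((((k+1) : Nat) : Int) + 1) = (((k+2) : Nat) : Int) := by push_cast; omega
  rw [e1, e2, e3, hprev]
  rw [prev_get col n k (by omega), prev_get col n (k+1) (by omega), prev_get col n (k+2) (by omega)]
  rw [toBits_get col (stepN col n) k hkcol]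
  -- the three neighbour cells as testBits of n
  have hl : (if k = 0 then 0 else if k = col+1 then 0 else bitI n (col - k))
      = (if n.testBit (col - k) then (1:Int) else 0) := by
    by_cases h0 : k = 0
    · subst h0
      have hz : n.testBit col = false := Nat.testBit_lt_two_pow hn
      simp [hz]
    · have : ¬ k = col + 1 := by omega
      simp [h0, this, bitI]
  have hc : (if k+1 = 0 then 0 else if k+1 = col+1 then 0 else bitI n (col - (k+1)))
      = (if k+1 = col+1 then (0:Int) else if n.testBit (col - (k+1)) then 1 else 0) := by
    split_ifs with h h' <;> simp_all [bitI]
  have hr : (if k+2 = 0 then 0 else if k+2 = col+1 then 0 else bitI n (col - (k+2)))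
      = (if decide (k < col - 1) && n.testBit (col - 2 - k) then (1:Int) else 0) := by
    by_cases hend : k + 2 = col + 1
    · have : ¬ (k < col - 1) := by omega
      simp [hend, this]
    · have hlt : k < col - 1 := by omega
      have he : col - (k+2) = col - 2 - k := by omega
      simp [hend, hlt, bitI, he]
  rw [hl, hc, hr]
  -- the target bit
  have hb : (stepN col n).testBit (col-1-k)
      = ((decide (k < col - 1) && n.testBit (col - 2 - k)).xor (n.testBit (col - k))) := by
    unfold stepN
    rw [Nat.testBit_and, Nat.testBit_two_pow_sub_one, Nat.testBit_xor,
        Nat.testBit_shiftLeft, Nat.testBit_shiftRight]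
    have d1 : decide (col - 1 - k < col) = true := by simp; omega
    have d2 : decide (1 ≤ col - 1 - k) = decide (k < col - 1) := by
      rcases Nat.decEq 0 0 with _ | _ <;> · apply decide_eq_decide.mpr; omega
    have d3 : col - 1 - k - 1 = col - 2 - k := by omega
    have d4 : 1 + (col - 1 - k) = col - k := by omega
    rw [d1, d2, d3, d4, Bool.and_true]
  unfold bitI
  rw [hb]
  by_cases h1 : n.testBit (col - k) <;>
    by_cases h2 : k + 1 = col + 1 <;>
      by_cases h3 : n.testBit (col - (k+1)) <;>
        by_cases h4 : decide (k < col - 1) && n.testBit (col - 2 - k) <;>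
          simp [h1, h2, h3, h4]

-- the trap count of a padded row is the popcount of its bit encoding
theorem row_sum (col n : Nat) (hn : n < 2^col) :
    ([0] ++ toBits col n ++ [0] : List Int).foldl (· + ·) 0
      = (PySem.Int.bitCount (n : Int) : Int) := by
  have h : ∀ (l : List Int) (a : Int), l.foldl (· + ·) a = a + l.sum := by
    intro l a
    simpa using PySem.List.foldl_add l id a
  rw [h]
  simp [toBits_sum col n hn]

theorem sum_map_neg_int {α : Type} (l : List α) (f : α → Int) :
    (l.map (fun x => -(f x))).sum = -((l.map f).sum) := by
  induction l with
  | nil => simp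
  | cons a l ih => simp [ih]; ring

theorem iter_lt (col n0 : Nat) (hn0 : n0 < 2^col) (j : Nat) : (stepN col)^[j] n0 < 2^col := by
  induction j with
  | zero => simpa using hn0
  | succ j ih => rw [Function.iterate_succ_apply']; exact step_lt col _

-- the A-side loop state after m iterations: all rows produced so far, newest first
theorem iterA (col n0 : Nat) (hn0 : n0 < 2^col) (m : Nat) :
    (fun rev => nextRowA (col : Int) (rev.headD []) :: rev)^[m] [[0] ++ toBits col n0 ++ [0]]
      = ((List.range (m+1)).map (fun j => [0] ++ toBits col ((stepN col)^[j] n0) ++ [0])).reverse := by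
  set g : Nat → List Int := fun j => [0] ++ toBits col ((stepN col)^[j] n0) ++ [0] with hg
  induction m with
  | zero => simp [hg]
  | succ m ih =>
      rw [Function.iterate_succ_apply', ih]
      have h1 : ((List.range (m+1)).map g).reverse = g m :: ((List.range m).map g).reverse := by
        rw [List.range_succ, List.map_append, List.reverse_append]; rfl
      have h2 : ((List.range (m+1+1)).map g).reverse = g (m+1) :: ((List.range (m+1)).map g).reverse := by
        rw [List.range_succ, List.map_append, List.reverse_append]; rfl
      rw [h2, h1]
      simp only [List.headD_cons]
      rw [← h1]
      congr 1
      rw [hg]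
      simp only []
      rw [step_row col _ (iter_lt col n0 hn0 m), Function.iterate_succ_apply']

-- B's row transition on a Nat-encoded row equals stepN
theorem stepInt (col n : Nat) :
    PySem.Int.band (PySem.Int.bxor (((n:Int)) <<< 1) (((n:Int)) >>> 1)) ((1 <<< col : Int) - 1)
      = ((stepN col n : Nat) : Int) := by
  have hs1 : ((n:Int) <<< 1) = ((n <<< 1 : Nat) : Int) := rfl
  have hs2 : ((n:Int) >>> 1) = ((n >>> 1 : Nat) : Int) := rfl
  have hm : ((1 <<< col : Int) - 1) = ((2^col - 1 : Nat) : Int) := by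
    rw [Nat.one_shiftLeft]
    have : (1:Nat) ≤ 2^col := Nat.one_le_two_pow
    push_cast [this]
    ring
  rw [hs1, hs2, hm, PySem.Int.bxor_natCast, PySem.Int.band_natCast]
  rfl

-- the B-side loop state after m iterations
theorem iterB (col n0 : Nat) (m : Nat) :
    (fun (st : Int × Int) =>
        (st.1 + ((col:Int) - (PySem.Int.bitCount st.2 : Int)),
         PySem.Int.band (PySem.Int.bxor (st.2 <<< 1) (st.2 >>> 1)) ((1 <<< col : Int) - 1)))^[m]
      (0, ((n0 : Nat) : Int))
      = (((List.range m).map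
            (fun j => (col:Int) - (PySem.Int.bitCount (((stepN col)^[j] n0 : Nat) : Int) : Int))).sum,
         (((stepN col)^[m] n0 : Nat) : Int)) := by
  induction m with
  | zero => simp
  | succ m ih =>
      rw [Function.iterate_succ_apply', ih]
      simp only []
      rw [stepInt col _, ← Function.iterate_succ_apply' (stepN col) m n0]
      rw [List.range_succ, List.map_append, List.sum_append]
      simp

-- ===== VERDICT (by name: the statement is the Claim_ definition above) =====
theorem taskTwo_spec : Claim_equal_taskTwo := by
  intro s _
  unfold Spec_taskTwo taskTwo taskTwo_alt
  simp only []
  set cs := s.toList with hcs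
  set col := cs.length with hcol
  set n0 := encN cs with hn0
  have hlt : n0 < 2^col := encN_lt cs
  -- A side
  rw [rowInit_eq s, List.foldl_const]
  have hlen : (PySem.List.pyRange 1 400000 1).length = 399999 := by
    rw [PySem.List.length_pyRange_one]; rfl
  rw [hlen, ← hcs]
  rw [show s.toList.length = col from by rw [hcol, hcs], show encN s.toList = n0 from by rw [hn0, hcs]]
  rw [iterA col n0 hlt 399999]
  rw [show (399999+1 = 400000) from rfl]
  rw [List.reverse_reverse]
  rw [PySem.List.foldl_add]
  rw [List.map_map]
  have htrap : (List.range 400000).map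
      ((fun row => List.foldl (fun x1 x2 => x1 + x2) 0 row) ∘
        (fun j => [0] ++ toBits col ((stepN col)^[j] n0) ++ [0]))
      = (List.range 400000).map (fun j => ((PySem.Int.bitCount (((stepN col)^[j] n0 : Nat) : Int) : Nat) : Int)) := by
    apply List.map_congr_left
    intro j hj
    exact row_sum col _ (iter_lt col n0 hlt j)
  rw [htrap]
  -- B side
  have hrow : List.foldl (fun row tile => PySem.Int.bor (row <<< 1) (if tile = '^' then 1 else 0)) 0 cs
      = ((n0 : Nat) : Int) := by
    have h := encInt cs 0
    simpa [hn0, encN] using h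
  rw [hrow, List.foldl_const, List.length_range]
  rw [iterB col n0 400000]
  simp only [zero_add]
  rw [show (fun j => (col:Int) - ((PySem.Int.bitCount (((stepN col)^[j] n0 : Nat) : Int) : Nat) : Int))
      = (fun j => (col:Int) + -(((PySem.Int.bitCount (((stepN col)^[j] n0 : Nat) : Int) : Nat) : Int))) from by
    funext j; ring]
  rw [PySem.List.sum_map_add_int, PySem.List.sum_map_const_int, sum_map_neg_int, List.length_range]
  push_cast
  ring
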